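-- pv_equiv track=rewrite | github.com/jun10920/PS | 프로그래머스/2/86971. 전력망을 둘로 나누기/전력망을 둘로 나누기.py | solution
-- ===== SOURCE A (Python) =====
-- from collections import defaultdict, deque
--
-- def bfs(graph, start):
--     visited = set([start])
--     queue = deque([start])
--     count = 1  # 시작 노드를 포함하여 카운트 시작
--
--     while queue:
--         node = queue.popleft()
--         for neighbor in graph[node]:
--             if neighbor not in visited:
--                 visited.add(neighbor)
--                 queue.append(neighbor)
--                 count += 1
--     return count
--
-- def solution(n, wires):
--     # 그래프 초기화
--     graph = defaultdict(list)
--     for v1, v2 in wires: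
--         graph[v1].append(v2)
--         graph[v2].append(v1)
--
--     # 최소 차이를 최대로 설정
--     min_diff = n
--
--     # 전선 순회 및 제거
--     for v1, v2 in wires:
--         # 전선 제거
--         graph[v1].remove(v2)
--         graph[v2].remove(v1)
--
--         # 송전탑 개수 계산
--         count = bfs(graph, v1)
--
--         # 송전탑 개수 차이 계산 및 최소 차이 업데이트
--         diff = abs(count - (n - count))
--         min_diff = min(min_diff, diff)
--
--         # 전선 복원
--         graph[v1].append(v2)
--         graph[v2].append(v1)
--
--     return min_diff
-- ===== SOURCE B (Python) =====
-- def solution(n, wires):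
--     # For each wire i, grow the component of its first endpoint by saturating a
--     # reachable list over the wire list itself (no adjacency dict, no BFS queue,
--     # no mutate/restore of a shared graph).
--     m = len(wires)
--     best = n
--     for i in range(m):
--         comp = [wires[i][0]]
--         while True:
--             prev = len(comp)
--             for j in range(m):
--                 if j != i:
--                     x, y = wires[j]
--                     if x in comp and y not in comp:
--                         comp.append(y)
--                     if y in comp and x not in comp:
--                         comp.append(x)
--             if len(comp) == prev:
--                 break
--         c = len(comp)
--         best = min(best, abs(c - (n - c)))
--     return best
-- ===== Notes on version B (the rewrite author's own statement) =====
-- stated objective: alternative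
-- what changed: Replaces A's adjacency dict with in-place edge removal/restore plus queue-based BFS by a direct fixed-point saturation: for each removed wire, the component of its endpoint is grown by repeatedly scanning the wire list (skipping the removed index) until no new tower is added.
import Mathlib
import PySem

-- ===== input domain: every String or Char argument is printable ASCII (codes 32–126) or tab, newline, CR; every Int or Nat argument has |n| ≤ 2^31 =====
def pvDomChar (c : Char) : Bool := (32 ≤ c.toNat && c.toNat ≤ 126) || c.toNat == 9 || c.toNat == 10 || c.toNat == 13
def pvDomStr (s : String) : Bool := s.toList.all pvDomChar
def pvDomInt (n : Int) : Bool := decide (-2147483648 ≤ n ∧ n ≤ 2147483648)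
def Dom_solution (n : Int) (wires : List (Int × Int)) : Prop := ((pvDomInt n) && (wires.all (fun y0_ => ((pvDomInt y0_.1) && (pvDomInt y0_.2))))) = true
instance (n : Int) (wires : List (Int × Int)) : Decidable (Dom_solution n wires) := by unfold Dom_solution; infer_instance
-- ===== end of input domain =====

-- B replaces A's adjacency-dict + remove/restore + queue BFS by a per-wire fixed-point
-- saturation over the wire list itself (objective: alternative algorithm, not speed).

-- ===== PORT A =====
-- graph[v1].append(v2); graph[v2].append(v1)   (defaultdict(list) access modelled by getD)
def buildStep (g : PySem.Dict Int (List Int)) (p : Int × Int) : PySem.Dict Int (List Int) :=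
  let g1 := g.insert p.1 (g.getD p.1 [] ++ [p.2])
  g1.insert p.2 (g1.getD p.2 [] ++ [p.1])

def buildGraph (wires : List (Int × Int)) : PySem.Dict Int (List Int) :=
  wires.foldl buildStep PySem.Dict.empty

-- graph[v1].remove(v2); graph[v2].remove(v1): List.erase drops the first occurrence;
-- exact here because both entries were appended at build time, so remove never raises
def removeWire (g : PySem.Dict Int (List Int)) (p : Int × Int) : PySem.Dict Int (List Int) :=
  let g1 := g.insert p.1 ((g.getD p.1 []).erase p.2)
  g1.insert p.2 ((g1.getD p.2 []).erase p.1)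

-- one neighbour of the inner 'for neighbor in graph[node]: if neighbor not in visited: …'
def bfsStep (s : PySem.Set Int × List Int × Int) (nb : Int) : PySem.Set Int × List Int × Int :=
  if PySem.Set.contains s.1 nb then s
  else (PySem.Set.add s.1 nb, s.2.1 ++ [nb], s.2.2 + 1)

def allAdj (g : PySem.Dict Int (List Int)) : List Int := g.values.flatten

-- 'while queue:' — fuel 2*|adjacency entries|+2 is termination fuel only (each iteration
-- pops one node and enqueues only never-visited ones, so the fuel is never exhausted)
def bfsLoop (g : PySem.Dict Int (List Int)) : Nat → PySem.Set Int → List Int → Int → Int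
  | 0, _, _, count => count
  | fuel + 1, visited, queue, count =>
    match queue with
    | [] => count
    | node :: qs =>
      let r := (g.getD node []).foldl bfsStep (visited, qs, count)
      bfsLoop g fuel r.1 r.2.1 r.2.2

def bfs (g : PySem.Dict Int (List Int)) (start : Int) : Int :=
  bfsLoop g (2 * (allAdj g).length + 2) (PySem.Set.ofList [start]) [start] 1

-- one iteration of A's 'for v1, v2 in wires:' loop (remove, bfs, min, restore)
def solStepA (n : Int) (s : PySem.Dict Int (List Int) × Int) (p : Int × Int) :
    PySem.Dict Int (List Int) × Int :=
  let g2 := removeWire s.1 p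
  let count := bfs g2 p.1
  let diff := |count - (n - count)|
  (buildStep g2 p, min s.2 diff)

def solution (n : Int) (wires : List (Int × Int)) : Int :=
  (wires.foldl (solStepA n) (buildGraph wires, n)).2

-- ===== PORT B =====
-- body of B's 'for j in range(m): if j != i: x, y = wires[j]; …'
def roundStep (wires : List (Int × Int)) (i : Nat) (c : List Int) (j : Nat) : List Int :=
  if j ≠ i then
    match wires[j]? with
    | some q =>
      let c1 := if q.1 ∈ c ∧ q.2 ∉ c then c ++ [q.2] else c
      if q.2 ∈ c1 ∧ q.1 ∉ c1 then c1 ++ [q.1] else c1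
    | none => c
  else c

def satRound (wires : List (Int × Int)) (i : Nat) (c0 : List Int) : List Int :=
  (List.range wires.length).foldl (roundStep wires i) c0

-- 'while True: … if len(comp) == prev: break' — fuel 2*m+2 is termination fuel only
-- (every round but the last appends at least one of the ≤ 2*m+1 endpoints)
def satLoop (wires : List (Int × Int)) (i : Nat) : Nat → List Int → List Int
  | 0, c => c
  | fuel + 1, c =>
    let c' := satRound wires i c
    if c'.length = c.length then c' else satLoop wires i fuel c'

-- one iteration of B's 'for i in range(m):' loop
def solStepB (n : Int) (wires : List (Int × Int)) (best : Int) (i : Nat) : Int :=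
  match wires[i]? with
  | some p =>
    let comp := satLoop wires i (2 * wires.length + 2) [p.1]
    let c : Int := comp.length
    min best |c - (n - c)|
  | none => best

def solution_alt (n : Int) (wires : List (Int × Int)) : Int :=
  (List.range wires.length).foldl (solStepB n wires) n

-- ===== PRECONDITION & SPEC =====
def Spec_solution (n : Int) (wires : List (Int × Int)) (out : Int) : Prop := out = solution_alt n wires
instance (n : Int) (wires : List (Int × Int)) (out : Int) : Decidable (Spec_solution n wires out) := by unfold Spec_solution; infer_instance

-- ===== CLAIM (what is proved, stated in full; the proofs are below) =====
def Claim_equal_solution : Prop := ∀ (n : Int) (wires : List (Int × Int)), Dom_solution n wires → Spec_solution n wires (solution n wires)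

-- ===== LEMMAS AND PROOFS =====

-- p connects x and y (as an undirected wire)
def Conn (p : Int × Int) (x y : Int) : Prop := (p.1 = x ∧ p.2 = y) ∨ (p.1 = y ∧ p.2 = x)
-- some wire of L connects x and y
def ERel (L : List (Int × Int)) (x y : Int) : Prop := ∃ p ∈ L, Conn p x y
-- reachability in the graph with wire list L
def Reach (L : List (Int × Int)) (s x : Int) : Prop := Relation.ReflTransGen (ERel L) s x
-- adjacency relation of a dict
def NRel (g : PySem.Dict Int (List Int)) (x y : Int) : Prop := y ∈ g.getD x []
-- how many adjacency entries wire p contributes to graph[x] at value y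
def contribE (p : Int × Int) (x y : Int) : Nat :=
  (if p.1 = x ∧ p.2 = y then 1 else 0) + (if p.2 = x ∧ p.1 = y then 1 else 0)
def countE (L : List (Int × Int)) (x y : Int) : Nat := (L.map (contribE · x y)).sum
-- g is the adjacency dict of wires, counted with multiplicity
def GChar (wires : List (Int × Int)) (g : PySem.Dict Int (List Int)) : Prop :=
  ∀ x y, ((g.getD x []).count y) = countE wires x y

theorem contribE_pos (p : Int × Int) (x y : Int) : 0 < contribE p x y ↔ Conn p x y := by
  unfold contribE Conn
  by_cases h1 : (p.1 = x ∧ p.2 = y) <;> by_cases h2 : (p.2 = x ∧ p.1 = y) <;>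
    (simp [h1, h2]; try tauto)

theorem countE_cons (p : Int × Int) (L : List (Int × Int)) (x y : Int) :
    countE (p :: L) x y = contribE p x y + countE L x y := by
  simp [countE]

theorem countE_pos (L : List (Int × Int)) (x y : Int) : 0 < countE L x y ↔ ERel L x y := by
  induction L with
  | nil => simp [countE, ERel]
  | cons p L ih =>
    rw [countE_cons, ERel]
    simp only [List.mem_cons]
    constructor
    · intro h
      by_cases hp : 0 < contribE p x y
      · exact ⟨p, Or.inl rfl, (contribE_pos p x y).mp hp⟩
      · have h2 := ih.mp (by omega)
        rw [ERel] at h2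
        obtain ⟨q, hq, hc⟩ := h2
        exact ⟨q, Or.inr hq, hc⟩
    · rintro ⟨q, hq | hq, hc⟩
      · subst hq
        have := (contribE_pos q x y).mpr hc
        omega
      · have : 0 < countE L x y := ih.mpr (by rw [ERel]; exact ⟨q, hq, hc⟩)
        omega

theorem contribE_le_countE (L : List (Int × Int)) (p : Int × Int) (x y : Int) (h : p ∈ L) :
    contribE p x y ≤ countE L x y := by
  induction L with
  | nil => simp at h
  | cons q L ih =>
    rw [countE_cons]
    rcases List.mem_cons.mp h with h | h
    · subst h; omega
    · have := ih h
      omega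

theorem countE_eraseIdx (wires : List (Int × Int)) (i : Nat) (p : Int × Int) (x y : Int)
    (h : wires[i]? = some p) :
    countE wires x y = contribE p x y + countE (wires.eraseIdx i) x y := by
  induction wires generalizing i with
  | nil => simp at h
  | cons q ws ih =>
    cases i with
    | zero =>
      simp only [List.getElem?_cons_zero, Option.some.injEq] at h
      subst h
      simp [countE_cons, List.eraseIdx]
    | succ i =>
      simp only [List.getElem?_cons_succ] at h
      have := ih i h
      simp only [List.eraseIdx, countE_cons]
      omega

theorem mem_eraseIdx_of_getElem? (wires : List (Int × Int)) (i j : Nat) (p : Int × Int)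
    (hne : j ≠ i) (h : wires[j]? = some p) : p ∈ wires.eraseIdx i := by
  induction wires generalizing i j with
  | nil => simp at h
  | cons q ws ih =>
    cases j with
    | zero =>
      simp only [List.getElem?_cons_zero, Option.some.injEq] at h
      subst h
      cases i with
      | zero => exact absurd rfl hne
      | succ i => simp [List.eraseIdx]
    | succ j =>
      simp only [List.getElem?_cons_succ] at h
      cases i with
      | zero =>
        simp only [List.eraseIdx]
        exact List.mem_of_getElem? h
      | succ i =>
        have := ih i j (fun hji => hne (by omega)) h
        simp [List.eraseIdx, this]

theorem getElem?_of_mem_eraseIdx (wires : List (Int × Int)) (i : Nat) (p : Int × Int)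
    (h : p ∈ wires.eraseIdx i) : ∃ j, j ≠ i ∧ wires[j]? = some p := by
  induction wires generalizing i with
  | nil => simp [List.eraseIdx] at h
  | cons q ws ih =>
    cases i with
    | zero =>
      simp only [List.eraseIdx] at h
      obtain ⟨j, hj⟩ := List.mem_iff_getElem?.mp h
      exact ⟨j + 1, by omega, by simpa using hj⟩
    | succ i =>
      simp only [List.eraseIdx, List.mem_cons] at h
      rcases h with h | h
      · exact ⟨0, by omega, by simp [h]⟩
      · obtain ⟨j, hj, hget⟩ := ih i h
        exact ⟨j + 1, by omega, by simpa using hget⟩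

def addEntry (g : PySem.Dict Int (List Int)) (a b : Int) : PySem.Dict Int (List Int) :=
  g.insert a (g.getD a [] ++ [b])

def eraseEntry (g : PySem.Dict Int (List Int)) (a b : Int) : PySem.Dict Int (List Int) :=
  g.insert a ((g.getD a []).erase b)

theorem count_addEntry (g : PySem.Dict Int (List Int)) (a b x y : Int) :
    (((addEntry g a b).getD x []).count y)
      = (g.getD x []).count y + (if a = x ∧ b = y then 1 else 0) := by
  unfold addEntry
  rw [PySem.Dict.getD_insert]
  by_cases h : x = a
  · subst h
    rw [if_pos rfl, List.count_append]
    simp only [List.count_cons, List.count_nil, beq_iff_eq]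
    split_ifs <;> simp_all
  · rw [if_neg h, if_neg (fun hc => h hc.1.symm)]
    omega

theorem count_eraseEntry (g : PySem.Dict Int (List Int)) (a b x y : Int) :
    (((eraseEntry g a b).getD x []).count y)
      = (g.getD x []).count y - (if a = x ∧ b = y then 1 else 0) := by
  unfold eraseEntry
  rw [PySem.Dict.getD_insert]
  by_cases h : x = a
  · subst h
    rw [if_pos rfl, List.count_erase]
    simp only [beq_iff_eq]
    split_ifs <;> simp_all
  · rw [if_neg h, if_neg (fun hc => h hc.1.symm)]
    omega

theorem buildStep_eq (g : PySem.Dict Int (List Int)) (p : Int × Int) :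
    buildStep g p = addEntry (addEntry g p.1 p.2) p.2 p.1 := rfl

theorem removeWire_eq (g : PySem.Dict Int (List Int)) (p : Int × Int) :
    removeWire g p = eraseEntry (eraseEntry g p.1 p.2) p.2 p.1 := rfl

theorem buildStep_count (g : PySem.Dict Int (List Int)) (p : Int × Int) (x y : Int) :
    (((buildStep g p).getD x []).count y) = (g.getD x []).count y + contribE p x y := by
  rw [buildStep_eq, count_addEntry, count_addEntry, contribE]
  omega

theorem removeWire_count (g : PySem.Dict Int (List Int)) (p : Int × Int) (x y : Int) :
    (((removeWire g p).getD x []).count y) = (g.getD x []).count y - contribE p x y := by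
  rw [removeWire_eq, count_eraseEntry, count_eraseEntry, contribE]
  omega

theorem buildGraph_go (ws : List (Int × Int)) :
    ∀ (g : PySem.Dict Int (List Int)) (x y : Int),
      (((ws.foldl buildStep g).getD x []).count y) = (g.getD x []).count y + countE ws x y := by
  induction ws with
  | nil => intro g x y; simp [countE]
  | cons p ws ih =>
    intro g x y
    simp only [List.foldl_cons]
    rw [ih, buildStep_count, countE_cons]
    omega

theorem buildGraph_char (wires : List (Int × Int)) : GChar wires (buildGraph wires) := by
  intro x y
  unfold buildGraph
  rw [buildGraph_go]
  simp [PySem.Dict.getD_empty]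

theorem mem_getD_allAdj (g : PySem.Dict Int (List Int)) (k x : Int) (h : x ∈ g.getD k []) :
    x ∈ allAdj g := by
  cases hg : g.get? k with
  | none =>
    rw [PySem.Dict.getD_eq_get?_getD, hg] at h
    simp at h
  | some l =>
    rw [PySem.Dict.getD_eq_get?_getD, hg] at h
    simp only [Option.getD_some] at h
    have hmem : (k, l) ∈ g.items := PySem.Dict.mem_items_of_get?_eq_some g hg
    exact List.mem_flatten.mpr ⟨l, List.mem_map_of_mem hmem, h⟩

-- a sound, closed set containing s is exactly the reachable set
theorem mem_iff_reach {R : Int → Int → Prop} (V : List Int) (s : Int)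
    (hs : s ∈ V) (hsound : ∀ v ∈ V, Relation.ReflTransGen R s v)
    (hclosed : ∀ v ∈ V, ∀ y, R v y → y ∈ V) :
    ∀ x, x ∈ V ↔ Relation.ReflTransGen R s x := by
  intro x
  constructor
  · exact hsound x
  · intro hr
    induction hr with
    | refl => exact hs
    | tail _ hR ih => exact hclosed _ ih _ hR

theorem length_eq_of_same_mem (V W : List Int) (hV : V.Nodup) (hW : W.Nodup)
    (h : ∀ x, x ∈ V ↔ x ∈ W) : V.length = W.length := by
  exact ((List.perm_ext_iff_of_nodup hV hW).mpr h).length_eq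

-- the inner neighbour loop of A's bfs, characterised
theorem foldNb (l : List Int) : ∀ (vis q : List Int) (cnt : Int), vis.Nodup → cnt = (vis.length : Int) →
    ∃ vis' q' cnt', l.foldl bfsStep (vis, q, cnt) = (vis', q', cnt') ∧
      vis'.Nodup ∧ (∀ x, x ∈ vis' ↔ x ∈ vis ∨ x ∈ l) ∧
      (∀ x, x ∈ q' ↔ x ∈ q ∨ (x ∈ l ∧ x ∉ vis)) ∧
      cnt' = (vis'.length : Int) ∧ vis.length ≤ vis'.length ∧
      q'.length + vis.length = q.length + vis'.length := by
  induction l with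
  | nil =>
    intro vis q cnt hnd hcnt
    exact ⟨vis, q, cnt, rfl, hnd, by simp, by simp, hcnt, le_refl _, by omega⟩
  | cons a l ih =>
    intro vis q cnt hnd hcnt
    rw [List.foldl_cons]
    by_cases ha : a ∈ vis
    · have hstep : bfsStep (vis, q, cnt) a = (vis, q, cnt) := by
        unfold bfsStep
        rw [if_pos ((PySem.Set.contains_iff _ _).mpr ha)]
      rw [hstep]
      obtain ⟨v', q', c', heq, h1, h2, h3, h4, h5, h6⟩ := ih vis q cnt hnd hcnt
      refine ⟨v', q', c', heq, h1, ?_, ?_, h4, h5, by omega⟩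
      · intro x
        rw [h2]
        simp only [List.mem_cons]
        constructor
        · tauto
        · rintro (hx | rfl | hx) <;> tauto
      · intro x
        rw [h3]
        simp only [List.mem_cons]
        constructor
        · tauto
        · rintro (hx | ⟨rfl | hx, hnv⟩) <;> tauto
    · have hstep : bfsStep (vis, q, cnt) a = (vis ++ [a], q ++ [a], cnt + 1) := by
        unfold bfsStep
        rw [if_neg (fun hc => ha ((PySem.Set.contains_iff _ _).mp hc))]
        rw [PySem.Set.add_of_not_mem ha]
      rw [hstep]
      have hnd' : (vis ++ [a]).Nodup := by
        simp [List.nodup_append, hnd]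
        exact fun b hb hba => ha (hba ▸ hb)
      obtain ⟨v', q', c', heq, h1, h2, h3, h4, h5, h6⟩ :=
        ih (vis ++ [a]) (q ++ [a]) (cnt + 1) hnd'
          (by rw [hcnt, List.length_append]; push_cast; simp)
      refine ⟨v', q', c', heq, h1, ?_, ?_, h4, ?_, ?_⟩
      · intro x
        rw [h2]
        simp only [List.mem_append, List.mem_cons, List.not_mem_nil, or_false]
        tauto
      · intro x
        rw [h3]
        simp only [List.mem_append, List.mem_cons, List.not_mem_nil, or_false]
        constructor
        · rintro ((hx | rfl) | ⟨hx, hnv⟩) <;> tauto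
        · rintro (hx | ⟨rfl | hx, hnv⟩)
          · tauto
          · tauto
          · by_cases hxa : x = a
            · tauto
            · exact Or.inr ⟨hx, by simp [hxa, hnv]⟩
      · rw [List.length_append] at h5
        simp at h5 ⊢
        omega
      · rw [List.length_append, List.length_append] at h6
        simp at h6 ⊢
        omega


-- A's BFS loop computes the size of the reachable set
theorem bfsLoop_spec (g : PySem.Dict Int (List Int)) (s : Int) :
    ∀ (fuel : Nat) (vis q : List Int) (cnt : Int),
      vis.Nodup → s ∈ vis →
      (∀ v ∈ q, v ∈ vis) →
      (∀ v ∈ vis, Relation.ReflTransGen (NRel g) s v) →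
      (∀ v ∈ vis, v ∈ q ∨ ∀ y, NRel g v y → y ∈ vis) →
      (∀ v ∈ vis, v ∈ (s :: allAdj g).dedup) →
      cnt = (vis.length : Int) →
      ((s :: allAdj g).dedup.length - vis.length) * 2 + q.length ≤ fuel →
      ∃ V : List Int, V.Nodup ∧ (∀ x, x ∈ V ↔ Relation.ReflTransGen (NRel g) s x) ∧
        bfsLoop g fuel vis q cnt = (V.length : Int) := by
  intro fuel
  induction fuel with
  | zero =>
    intro vis q cnt hnd hs hvq hreach hclosed hsub hcnt hfuel
    have hq : q = [] := List.length_eq_zero_iff.mp (by omega)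
    subst hq
    refine ⟨vis, hnd, mem_iff_reach vis s hs hreach (fun v hv y hR => ?_), by simp [bfsLoop, hcnt]⟩
    rcases hclosed v hv with h | h
    · simp at h
    · exact h y hR
  | succ fuel ih =>
    intro vis q cnt hnd hs hvq hreach hclosed hsub hcnt hfuel
    cases q with
    | nil =>
      refine ⟨vis, hnd, mem_iff_reach vis s hs hreach (fun v hv y hR => ?_), by simp [bfsLoop, hcnt]⟩
      rcases hclosed v hv with h | h
      · simp at h
      · exact h y hR
    | cons node qs =>
      obtain ⟨v', q', c', heq, h1, h2, h3, h4, h5, h6⟩ :=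
        foldNb (g.getD node []) vis qs cnt hnd hcnt
      have hkey : bfsLoop g (fuel + 1) vis (node :: qs) cnt = bfsLoop g fuel v' q' c' := by
        simp only [bfsLoop]
        rw [heq]
      rw [hkey]
      have hnode : node ∈ vis := hvq node (by simp)
      have hsubvis : ∀ x ∈ vis, x ∈ v' := fun x hx => (h2 x).mpr (Or.inl hx)
      have hsub' : ∀ v ∈ v', v ∈ (s :: allAdj g).dedup := by
        intro v hv
        rcases (h2 v).mp hv with h | h
        · exact hsub v h
        · exact List.mem_dedup.mpr (List.mem_cons.mpr (Or.inr (mem_getD_allAdj g node v h)))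
      have hv'le : v'.length ≤ (s :: allAdj g).dedup.length :=
        (List.subperm_of_subset h1 hsub').length_le
      have hvisle : vis.length ≤ (s :: allAdj g).dedup.length :=
        (List.subperm_of_subset hnd hsub).length_le
      have hq1 : (node :: qs).length = qs.length + 1 := rfl
      refine ih v' q' c' h1 (hsubvis s hs) ?_ ?_ ?_ hsub' h4 (by omega)
      · intro v hv
        rcases (h3 v).mp hv with h | h
        · exact hsubvis v (hvq v (by simp [h]))
        · exact (h2 v).mpr (Or.inr h.1)
      · intro v hv
        rcases (h2 v).mp hv with h | h
        · exact hreach v h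
        · exact Relation.ReflTransGen.tail (hreach node hnode) h
      · intro v hv
        by_cases hv2 : v ∈ vis
        · rcases hclosed v hv2 with hq1 | hcl
          · rcases List.mem_cons.mp hq1 with h' | hq2
            · subst h'
              right
              intro y hy
              exact (h2 y).mpr (Or.inr hy)
            · left
              exact (h3 v).mpr (Or.inl hq2)
          · right
            intro y hy
            exact hsubvis y (hcl y hy)
        · have hvl : v ∈ g.getD node [] := by
            rcases (h2 v).mp hv with h | h
            · exact absurd h hv2
            · exact h
          left
          exact (h3 v).mpr (Or.inr ⟨hvl, hv2⟩)


theorem bfs_spec (g : PySem.Dict Int (List Int)) (s : Int) :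
    ∃ V : List Int, V.Nodup ∧ (∀ x, x ∈ V ↔ Relation.ReflTransGen (NRel g) s x) ∧
      bfs g s = (V.length : Int) := by
  have hofl : PySem.Set.ofList [s] = [s] := rfl
  have hded : (s :: allAdj g).dedup.length ≤ (allAdj g).length + 1 := by
    have := (s :: allAdj g).dedup_sublist.length_le
    simpa using this
  have h1 : (s :: allAdj g).dedup.length ≥ 1 := by
    have : s ∈ (s :: allAdj g).dedup := List.mem_dedup.mpr (by simp)
    exact List.length_pos_of_mem this
  unfold bfs
  rw [hofl]
  exact bfsLoop_spec g s (2 * (allAdj g).length + 2) [s] [s] 1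
    (by simp) (by simp) (by simp) (by intro v hv; simp at hv; subst hv; exact Relation.ReflTransGen.refl)
    (by intro v hv; simp at hv; subst hv; left; simp)
    (by intro v hv; simp at hv; subst hv; exact List.mem_dedup.mpr (by simp))
    (by simp) (by simp; omega)


-- one index of B's round, characterised
theorem roundStep_spec (wires : List (Int × Int)) (i j : Nat) (c : List Int) (hnd : c.Nodup) :
    ∃ u, roundStep wires i c j = c ++ u ∧ (c ++ u).Nodup ∧
      (∀ x ∈ u, ∃ p ∈ wires, x = p.1 ∨ x = p.2) ∧
      (∀ s, (∀ v ∈ c, Reach (wires.eraseIdx i) s v) → ∀ v ∈ c ++ u, Reach (wires.eraseIdx i) s v) ∧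
      (u = [] → j ≠ i → ∀ q, wires[j]? = some q → (q.1 ∈ c → q.2 ∈ c) ∧ (q.2 ∈ c → q.1 ∈ c)) := by
  unfold roundStep
  by_cases hj : j = i
  · rw [if_neg (by simp [hj])]
    exact ⟨[], by simp, by simpa using hnd, by simp, fun s hr => by simpa using hr,
      fun _ hji => absurd hj hji⟩
  · rw [if_pos hj]
    cases hw : wires[j]? with
    | none =>
      refine ⟨[], by simp, by simpa using hnd, by simp, fun s hr => by simpa using hr, ?_⟩
      intro _ _ q hq
      simp at hq
    | some q =>
      have hqw : q ∈ wires := List.mem_of_getElem? hw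
      have hqmem : q ∈ wires.eraseIdx i := mem_eraseIdx_of_getElem? wires i j q hj hw
      have hconn1 : ERel (wires.eraseIdx i) q.1 q.2 := ⟨q, hqmem, Or.inl ⟨rfl, rfl⟩⟩
      have hconn2 : ERel (wires.eraseIdx i) q.2 q.1 := ⟨q, hqmem, Or.inr ⟨rfl, rfl⟩⟩
      dsimp only
      by_cases hA : q.1 ∈ c ∧ q.2 ∉ c
      · rw [if_pos hA]
        have hB : ¬(q.2 ∈ c ++ [q.2] ∧ q.1 ∉ c ++ [q.2]) := by
          rintro ⟨_, hn⟩
          exact hn (by simp [hA.1])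
        rw [if_neg hB]
        refine ⟨[q.2], rfl, ?_, ?_, ?_, by simp⟩
        · simp [List.nodup_append, hnd]
          exact fun b hb hbe => hA.2 (hbe ▸ hb)
        · intro x hx
          simp only [List.mem_singleton] at hx
          subst hx
          exact ⟨q, hqw, Or.inr rfl⟩
        · intro s hr v hv
          rcases List.mem_append.mp hv with h | h
          · exact hr v h
          · simp only [List.mem_singleton] at h
            subst h
            exact Relation.ReflTransGen.tail (hr q.1 hA.1) hconn1
      · rw [if_neg hA]
        by_cases hB : q.2 ∈ c ∧ q.1 ∉ c
        · rw [if_pos hB]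
          refine ⟨[q.1], rfl, ?_, ?_, ?_, by simp⟩
          · simp [List.nodup_append, hnd]
            exact fun b hb hbe => hB.2 (hbe ▸ hb)
          · intro x hx
            simp only [List.mem_singleton] at hx
            subst hx
            exact ⟨q, hqw, Or.inl rfl⟩
          · intro s hr v hv
            rcases List.mem_append.mp hv with h | h
            · exact hr v h
            · simp only [List.mem_singleton] at h
              subst h
              exact Relation.ReflTransGen.tail (hr q.2 hB.1) hconn2
        · rw [if_neg hB]
          refine ⟨[], by simp, by simpa using hnd, by simp, fun s hr => by simpa using hr, ?_⟩
          intro _ _ q' hq'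
          injection hq' with hqq
          subst hqq
          push_neg at hA hB
          exact ⟨hA, hB⟩


theorem round_go (wires : List (Int × Int)) (i : Nat) (s : Int) (js : List Nat) :
    ∀ c : List Int, c.Nodup → (∀ v ∈ c, Reach (wires.eraseIdx i) s v) →
    ∃ t, js.foldl (roundStep wires i) c = c ++ t ∧
      (c ++ t).Nodup ∧
      (∀ x ∈ t, ∃ p ∈ wires, x = p.1 ∨ x = p.2) ∧
      (∀ v ∈ c ++ t, Reach (wires.eraseIdx i) s v) ∧
      (t = [] → ∀ j ∈ js, j ≠ i → ∀ q, wires[j]? = some q → (q.1 ∈ c → q.2 ∈ c) ∧ (q.2 ∈ c → q.1 ∈ c)) := by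
  induction js with
  | nil =>
    intro c hnd hreach
    exact ⟨[], by simp, by simpa using hnd, by simp, by simpa using hreach,
      fun _ j hj => by simp at hj⟩
  | cons j js ih =>
    intro c hnd hreach
    obtain ⟨u, hequ, hndu, hendu, hreachu, hclosu⟩ := roundStep_spec wires i j c hnd
    have hreach1 : ∀ v ∈ c ++ u, Reach (wires.eraseIdx i) s v := hreachu s hreach
    obtain ⟨t1, heqt, hndt, hendt, hreacht, hclost⟩ := ih (c ++ u) hndu hreach1
    refine ⟨u ++ t1, ?_, ?_, ?_, ?_, ?_⟩
    · rw [List.foldl_cons, hequ, heqt, List.append_assoc]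
    · rw [← List.append_assoc]
      exact hndt
    · intro x hx
      rcases List.mem_append.mp hx with h | h
      · exact hendu x h
      · exact hendt x h
    · intro v hv
      apply hreacht
      rw [← List.append_assoc] at hv
      exact hv
    · intro ht0 j' hj' hji q hq
      obtain ⟨hu0, ht10⟩ := List.append_eq_nil_iff.mp ht0
      rcases List.mem_cons.mp hj' with rfl | hj's
      · exact hclosu hu0 hji q hq
      · have := hclost ht10 j' hj's hji q hq
        rw [hu0, List.append_nil] at this
        exact this


theorem length_endpoints (wires : List (Int × Int)) :
    (wires.flatMap (fun p => [p.1, p.2])).length = 2 * wires.length := by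
  induction wires with
  | nil => simp
  | cons p ws ih => simp [List.flatMap_cons, ih]; omega

theorem reach_mem_univ (wires : List (Int × Int)) (i : Nat) (s x : Int)
    (h : Reach (wires.eraseIdx i) s x) :
    x ∈ (s :: wires.flatMap (fun p => [p.1, p.2])).dedup := by
  unfold Reach at h
  induction h with
  | refl => exact List.mem_dedup.mpr (by simp)
  | tail _ hE ih =>
    rename_i b c _
    rw [ERel] at hE
    obtain ⟨p, hp, hc⟩ := hE
    apply List.mem_dedup.mpr
    apply List.mem_cons.mpr
    right
    apply List.mem_flatMap.mpr
    refine ⟨p, List.eraseIdx_subset hp, ?_⟩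
    rcases hc with ⟨_, h2⟩ | ⟨h1, _⟩
    · simp [h2]
    · simp [h1]


-- B's saturation loop computes the reachable set
theorem satLoop_spec (wires : List (Int × Int)) (i : Nat) (s : Int) :
    ∀ (fuel : Nat) (c : List Int), c.Nodup → s ∈ c →
      (∀ v ∈ c, Reach (wires.eraseIdx i) s v) →
      (∀ v ∈ c, v ∈ (s :: wires.flatMap (fun p => [p.1, p.2])).dedup) →
      (s :: wires.flatMap (fun p => [p.1, p.2])).dedup.length ≤ fuel + c.length →
      ∃ W : List Int, W.Nodup ∧ (∀ x, x ∈ W ↔ Reach (wires.eraseIdx i) s x) ∧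
        satLoop wires i fuel c = W := by
  intro fuel
  induction fuel with
  | zero =>
    intro c hnd hs hreach hsub hlen
    have hperm : c.Perm ((s :: wires.flatMap (fun p => [p.1, p.2])).dedup) :=
      (List.subperm_of_subset hnd (fun x hx => hsub x hx)).perm_of_length_le (by omega)
    refine ⟨c, hnd, ?_, by simp [satLoop]⟩
    intro x
    constructor
    · exact hreach x
    · intro hr
      exact hperm.mem_iff.mpr (reach_mem_univ wires i s x hr)
  | succ fuel ih =>
    intro c hnd hs hreach hsub hlen
    obtain ⟨t, heq, hndt, hendt, hreacht, hclost⟩ :=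
      round_go wires i s (List.range wires.length) c hnd hreach
    have heq' : satRound wires i c = c ++ t := by
      unfold satRound
      exact heq
    by_cases ht : t = []
    · subst ht
      have hclosed : ∀ v ∈ c, ∀ y, ERel (wires.eraseIdx i) v y → y ∈ c := by
        intro v hv y hEy
        rw [ERel] at hEy
        obtain ⟨p, hp, hcn⟩ := hEy
        obtain ⟨j, hji, hj⟩ := getElem?_of_mem_eraseIdx wires i p hp
        have hjlt : j < wires.length := (List.getElem?_eq_some_iff.mp hj).1
        have hcl := hclost rfl j (List.mem_range.mpr hjlt) hji p hj
        rcases hcn with ⟨h1, h2⟩ | ⟨h1, h2⟩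
        · have hp1 : p.1 ∈ c := by rw [h1]; exact hv
          have hp2 := hcl.1 hp1
          rw [← h2]
          exact hp2
        · have hp2 : p.2 ∈ c := by rw [h2]; exact hv
          have hp1 := hcl.2 hp2
          rw [← h1]
          exact hp1
      refine ⟨c, hnd, mem_iff_reach c s hs hreach hclosed, ?_⟩
      show satLoop wires i (fuel + 1) c = c
      simp only [satLoop]
      rw [heq']
      simp
    · have htlen : 0 < t.length := List.length_pos_iff.mpr ht
      have hif : ¬((c ++ t).length = c.length) := by
        rw [List.length_append]
        omega
      have hstep : satLoop wires i (fuel + 1) c = satLoop wires i fuel (c ++ t) := by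
        simp only [satLoop]
        rw [heq', if_neg hif]
      rw [hstep]
      refine ih (c ++ t) hndt (by simp [hs]) hreacht ?_ ?_
      · intro v hv
        rcases List.mem_append.mp hv with h | h
        · exact hsub v h
        · obtain ⟨p, hp, hc12⟩ := hendt v h
          refine List.mem_dedup.mpr (List.mem_cons.mpr (Or.inr ?_))
          exact List.mem_flatMap.mpr ⟨p, hp, by rcases hc12 with rfl | rfl <;> simp⟩
      · rw [List.length_append]
        omega


-- per-wire agreement of the two component counts
theorem counts_agree (wires : List (Int × Int)) (k : Nat) (p : Int × Int)
    (g : PySem.Dict Int (List Int)) (hg : GChar wires g) (hk : wires[k]? = some p) :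
    bfs (removeWire g p) p.1 = ((satLoop wires k (2 * wires.length + 2) [p.1]).length : Int) := by
  have hpw : p ∈ wires := List.mem_of_getElem? hk
  have hadj : ∀ x y, NRel (removeWire g p) x y ↔ ERel (wires.eraseIdx k) x y := by
    intro x y
    unfold NRel
    rw [← List.count_pos_iff, removeWire_count, hg x y, countE_eraseIdx wires k p x y hk,
      show contribE p x y + countE (wires.eraseIdx k) x y - contribE p x y
        = countE (wires.eraseIdx k) x y from by omega]
    exact countE_pos _ x y
  obtain ⟨V, hVnd, hVmem, hVlen⟩ := bfs_spec (removeWire g p) p.1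
  have hfuel : (p.1 :: wires.flatMap (fun q => [q.1, q.2])).dedup.length
      ≤ (2 * wires.length + 2) + ([p.1] : List Int).length := by
    have h1 := (p.1 :: wires.flatMap (fun q => [q.1, q.2])).dedup_sublist.length_le
    have h2 := length_endpoints wires
    simp only [List.length_cons] at h1
    simp
    omega
  obtain ⟨W, hWnd, hWmem, hWlen⟩ := satLoop_spec wires k p.1 (2 * wires.length + 2) [p.1]
    (by simp) (by simp)
    (by intro v hv; simp at hv; subst hv; exact Relation.ReflTransGen.refl)
    (by intro v hv; simp at hv; subst hv; exact List.mem_dedup.mpr (by simp))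
    hfuel
  have hVW : ∀ x, x ∈ V ↔ x ∈ W := by
    intro x
    rw [hVmem, hWmem]
    constructor
    · intro hr
      exact Relation.ReflTransGen.mono (fun a b hab => (hadj a b).mp hab) hr
    · intro hr
      exact Relation.ReflTransGen.mono (fun a b hab => (hadj a b).mpr hab) hr
  rw [hVlen, hWlen]
  exact congrArg _ (length_eq_of_same_mem V W hVnd hWnd hVW)


theorem outer (n : Int) (wires : List (Int × Int)) :
    ∀ (ws : List (Int × Int)) (k : Nat) (g : PySem.Dict Int (List Int)) (acc : Int),
      wires.drop k = ws → GChar wires g →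
      (ws.foldl (solStepA n) (g, acc)).2 = (List.range' k ws.length).foldl (solStepB n wires) acc := by
  intro ws
  induction ws with
  | nil =>
    intro k g acc _ _
    simp
  | cons p ws' ih =>
    intro k g acc hdrop hg
    have hklt : k < wires.length := by
      by_contra h
      have hnil : wires.drop k = [] := List.drop_eq_nil_of_le (by omega)
      rw [hdrop] at hnil
      cases hnil
    have hk : wires[k]? = some p := by
      have h0 : (wires.drop k)[0]? = some p := by rw [hdrop]; rfl
      rw [List.getElem?_drop] at h0
      simpa using h0
    have hdrop' : wires.drop (k + 1) = ws' := by
      have h1 : wires.drop (k + 1) = (wires.drop k).drop 1 := by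
        rw [List.drop_drop]
      rw [h1, hdrop]
      rfl
    have hpw : p ∈ wires := List.mem_of_getElem? hk
    have hcnt := counts_agree wires k p g hg hk
    have hlen : (p :: ws').length = ws'.length + 1 := rfl
    rw [hlen, List.range'_succ, List.foldl_cons, List.foldl_cons]
    have hstepA : solStepA n (g, acc) p
        = (buildStep (removeWire g p) p,
           min acc |bfs (removeWire g p) p.1 - (n - bfs (removeWire g p) p.1)|) := rfl
    have hstepB : solStepB n wires acc k
        = min acc |bfs (removeWire g p) p.1 - (n - bfs (removeWire g p) p.1)| := by
      unfold solStepB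
      rw [hk]
      dsimp only
      rw [← hcnt]
    have hg4 : GChar wires (buildStep (removeWire g p) p) := by
      intro x y
      rw [buildStep_count, removeWire_count, hg x y]
      have h1 := contribE_le_countE wires p x y hpw
      omega
    rw [hstepA, hstepB]
    exact ih (k + 1) (buildStep (removeWire g p) p)
      (min acc |bfs (removeWire g p) p.1 - (n - bfs (removeWire g p) p.1)|) hdrop' hg4


-- ===== VERDICT (by name: the statement is the Claim_ definition above) =====
theorem solution_spec : Claim_equal_solution := by
  intro n wires _
  unfold Spec_solution solution solution_alt
  rw [List.range_eq_range']
  exact outer n wires wires 0 (buildGraph wires) n rfl (buildGraph_char wires)
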